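-- pv_equiv track=rewrite | github.com/mmlac/fieldnotes | worker/tests/test_migrate.py | _old_or_new_prefixes
-- ===== SOURCE A (Python) =====
-- def _old_or_new_prefixes(query: str) -> list[str]:
--     """Pull literal STARTS WITH prefix strings out of the query."""
--     prefixes: list[str] = []
--     idx = 0
--     marker = "STARTS WITH '"
--     while True:
--         start = query.find(marker, idx)
--         if start == -1:
--             break
--         literal_start = start + len(marker)
--         end = query.find("'", literal_start)
--         if end == -1:
--             break
--         prefixes.append(query[literal_start:end])
--         idx = end + 1
--     return prefixes
-- ===== SOURCE B (Python) =====
-- def _old_or_new_prefixes(query: str) -> list[str]: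
--     """Pull literal STARTS WITH prefix strings out of the query.
--
--     Single left-to-right character scan (a small state machine) instead of
--     repeated str.find jumps: at each position either recognise the marker and
--     collect the literal character by character up to its closing quote, or
--     step one character forward.  Stops on an unterminated literal.
--     """
--     marker = "STARTS WITH '"
--     n = len(query)
--     out: list[str] = []
--     i = 0
--     while i < n:
--         if query.startswith(marker, i):
--             j = i + len(marker)
--             lit: list[str] = []
--             while j < n and query[j] != "'":
--                 lit.append(query[j])
--                 j += 1
--             if j >= n:
--                 break
--             out.append("".join(lit))
--             i = j + 1
--         else:
--             i += 1
--     return out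
-- ===== Notes on version B (the rewrite author's own statement) =====
-- stated objective: alternative
-- what changed: Replaced A's repeated str.find jumps (find marker, find closing quote, slice) by a single left-to-right character scan that recognises the marker in place and collects each literal character by character up to its closing quote.
import Mathlib
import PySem

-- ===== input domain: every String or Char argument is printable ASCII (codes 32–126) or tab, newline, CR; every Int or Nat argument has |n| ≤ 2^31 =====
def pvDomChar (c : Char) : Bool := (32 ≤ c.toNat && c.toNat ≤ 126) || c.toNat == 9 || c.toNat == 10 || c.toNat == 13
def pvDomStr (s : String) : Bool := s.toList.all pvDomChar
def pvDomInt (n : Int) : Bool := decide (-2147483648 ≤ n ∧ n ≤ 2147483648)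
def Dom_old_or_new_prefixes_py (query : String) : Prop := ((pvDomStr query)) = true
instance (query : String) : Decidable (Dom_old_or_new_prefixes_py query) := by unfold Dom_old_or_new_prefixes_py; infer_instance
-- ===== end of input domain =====

-- B replaces A's repeated str.find jumps by a single left-to-right character scan; objective: alternative (same cost, different traversal).

-- the literal marker "STARTS WITH '" (13 characters)
def pvMarker : List Char := "STARTS WITH '".toList

-- findFrom with a start past the end of the string is -1 (needed for pvALoop's termination)
theorem pvFindFrom_neg_of_len_lt (s sub : List Char) (k : Int) (hk : (s.length : Int) < k) :
    PySem.Chars.findFrom s sub k none = -1 := by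
  simp only [PySem.Chars.findFrom]
  rw [if_neg (show ¬ k < 0 by omega), if_pos hk]

-- the facts A's loop needs about a successful findFrom (position ≥ start, occurrence fits, first occurrence)
theorem pvFindFrom_facts (s sub : List Char) (k : Int) (hk0 : 0 ≤ k) (hsub : sub ≠ [])
    (h : PySem.Chars.findFrom s sub k none ≠ -1) :
    k ≤ PySem.Chars.findFrom s sub k none ∧
    (PySem.Chars.findFrom s sub k none).toNat + sub.length ≤ s.length ∧
    sub <+: s.drop (PySem.Chars.findFrom s sub k none).toNat ∧
    (∀ i : Nat, k.toNat ≤ i → i < (PySem.Chars.findFrom s sub k none).toNat →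
      ¬ sub <+: s.drop i) := by
  by_cases hk : k.toNat ≤ s.length
  · have hkc : k = ((k.toNat : Nat) : Int) := by omega
    rw [hkc] at h ⊢
    obtain ⟨h1, h2, h3⟩ := PySem.Chars.findFrom_natCast_spec s sub k.toNat hk h
    refine ⟨h1, ?_, h2, h3⟩
    have hpl := h2.length_le
    rw [List.length_drop] at hpl
    have hsl : 0 < sub.length := List.length_pos_of_ne_nil hsub
    omega
  · exact absurd (pvFindFrom_neg_of_len_lt s sub k (by omega)) h

-- ===== PORT A =====
-- A's while-loop: find the marker from idx, find the closing quote, slice, continue after the quote.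
def pvALoop (s : List Char) (idx : Nat) (prefixes : List String) : List String :=
  if hs : PySem.Chars.findFrom s pvMarker (idx : Int) none = -1 then prefixes
  else
    -- literal_start = start + len(marker), len(marker) = 13
    if he : PySem.Chars.findFrom s ['\'']
        (PySem.Chars.findFrom s pvMarker (idx : Int) none + 13) none = -1 then prefixes
    else
      pvALoop s
        ((PySem.Chars.findFrom s ['\'']
            (PySem.Chars.findFrom s pvMarker (idx : Int) none + 13) none).toNat + 1)
        (prefixes ++ [String.ofList (PySem.Chars.slice s
            (some (PySem.Chars.findFrom s pvMarker (idx : Int) none + 13))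
            (some (PySem.Chars.findFrom s ['\'']
              (PySem.Chars.findFrom s pvMarker (idx : Int) none + 13) none)))])
  termination_by s.length + 1 - idx
  decreasing_by
    obtain ⟨h1, h2, -, -⟩ :=
      pvFindFrom_facts s pvMarker (idx : Int) (by positivity) (by decide) hs
    obtain ⟨g1, g2, -, -⟩ :=
      pvFindFrom_facts s ['\'']
        (PySem.Chars.findFrom s pvMarker (idx : Int) none + 13) (by omega) (by decide) he
    simp only [List.length_cons, List.length_nil] at g2
    omega

def old_or_new_prefixes_py (query : String) : List String := pvALoop query.toList 0 []

-- ===== PORT B =====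
-- inner while of Source B: while j < n and query[j] != "'": collect; returns (j, lit).
-- s.getD j ' ' is exact for query[j] here: it is only read under j < n.
def pvBInner (s : List Char) (n j : Nat) (lit : List Char) : Nat × List Char :=
  if _h : j < n ∧ s.getD j ' ' ≠ '\'' then pvBInner s n (j + 1) (lit ++ [s.getD j ' '])
  else (j, lit)
  termination_by n - j

-- pvBInner never moves backwards (needed for pvBOuter's termination)
theorem pvBInner_fst_ge (s : List Char) (n : Nat) : ∀ j lit, j ≤ (pvBInner s n j lit).1 := by
  intro j lit
  induction hk : n - j using Nat.strong_induction_on generalizing j lit with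
  | _ k ih =>
    rw [pvBInner]
    split
    · next h => exact le_trans (Nat.le_succ j) (ih (n - (j + 1)) (by omega) _ _ rfl)
    · exact le_refl j

-- outer while of Source B: step one char at a time; on the marker, collect the literal.
-- query.startswith(marker, i) is ported as startswith on the i-suffix (exact for 0 ≤ i).
def pvBOuter (s : List Char) (n i : Nat) (out : List String) : List String :=
  if h : i < n then
    if PySem.Chars.startswith (s.drop i) pvMarker then
      -- j = i + len(marker); scan the literal with the inner while
      if n ≤ (pvBInner s n (i + 13) []).1 then out
      else pvBOuter s n ((pvBInner s n (i + 13) []).1 + 1)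
             (out ++ [String.ofList (pvBInner s n (i + 13) []).2])
    else pvBOuter s n (i + 1) out
  else out
  termination_by n - i
  decreasing_by
  · have := pvBInner_fst_ge s n (i + 13) []
    omega
  · omega

def old_or_new_prefixes_py_alt (query : String) : List String :=
  pvBOuter query.toList query.toList.length 0 []

-- ===== PRECONDITION & SPEC =====
def Spec_old_or_new_prefixes_py (query : String) (out : List String) : Prop := out = old_or_new_prefixes_py_alt query
instance (query : String) (out : List String) : Decidable (Spec_old_or_new_prefixes_py query out) := by unfold Spec_old_or_new_prefixes_py; infer_instance

-- ===== CLAIM (what is proved, stated in full; the proofs are below) =====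
def Claim_equal_old_or_new_prefixes_py : Prop := ∀ (query : String), Dom_old_or_new_prefixes_py query → Spec_old_or_new_prefixes_py query (old_or_new_prefixes_py query)

-- ===== LEMMAS AND PROOFS =====

-- a singleton is a prefix of the p-suffix iff the character at p is that character
theorem pvSingleton_prefix_iff (s : List Char) (p : Nat) (c : Char) (hc : c ≠ ' ') :
    [c] <+: s.drop p ↔ (p < s.length ∧ s.getD p ' ' = c) := by
  by_cases h : p < s.length
  · rw [List.drop_eq_getElem_cons h]
    have : s.getD p ' ' = s[p] := List.getD_eq_getElem s ' ' h
    constructor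
    · rintro ⟨t, ht⟩
      simp only [List.cons_append, List.cons.injEq] at ht
      exact ⟨h, by rw [this, ht.1]⟩
    · rintro ⟨-, hq⟩
      exact ⟨s.drop (p + 1), by rw [this] at hq; rw [hq]; rfl⟩
  · rw [List.drop_eq_nil_of_le (by omega)]
    simp only [List.prefix_nil]
    constructor
    · intro hcontra; simp at hcontra
    · rintro ⟨hlt, -⟩; omega

-- no prefix occurrence of sub at or after i, from "sub not an infix of the i-suffix"
theorem pvNoPrefixFrom (s sub : List Char) (i : Nat) (h : ¬ sub <:+: s.drop i) :
    ∀ p : Nat, i ≤ p → ¬ sub <+: s.drop p := by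
  intro p hp hpre
  apply h
  have : s.drop p = (s.drop i).drop (p - i) := by
    rw [List.drop_drop]; congr 1; omega
  rw [this] at hpre
  exact hpre.isInfix.trans (List.drop_suffix _ _).isInfix

-- B's outer loop skips positions that do not start a marker occurrence
theorem pvBOuter_skip (s : List Char) : ∀ d i out, i + d ≤ s.length + d →
    (∀ p : Nat, i ≤ p → p < i + d → ¬ pvMarker <+: s.drop p) →
    pvBOuter s s.length i out = pvBOuter s s.length (i + d) out := by
  intro d
  induction d with
  | zero => intro i out _ _; rfl
  | succ d ih =>
    intro i out hlen hno
    by_cases hi : i < s.length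
    · rw [pvBOuter, dif_pos hi]
      rw [if_neg]
      · have := ih (i + 1) out (by omega) (fun p hp1 hp2 => hno p (by omega) (by omega))
        rw [this]; congr 1; omega
      · intro hsw
        exact hno i (le_refl i) (by omega) (((PySem.Chars.startswith_iff _ _).mp hsw))
    · rw [pvBOuter, dif_neg hi]
      have h2 : ¬ i + (d + 1) < s.length := by omega
      rw [pvBOuter, dif_neg h2]

-- B's outer loop returns out when no marker occurrence remains
theorem pvBOuter_none (s : List Char) : ∀ fuel i out, s.length ≤ i + fuel →
    (∀ p : Nat, i ≤ p → ¬ pvMarker <+: s.drop p) →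
    pvBOuter s s.length i out = out := by
  intro fuel
  induction fuel with
  | zero =>
    intro i out hlen _
    rw [pvBOuter, dif_neg (by omega)]
  | succ fuel ih =>
    intro i out hlen hno
    by_cases hi : i < s.length
    · rw [pvBOuter, dif_pos hi, if_neg]
      · exact ih (i + 1) out (by omega) (fun p hp => hno p (by omega))
      · intro hsw
        exact hno i (le_refl i) (((PySem.Chars.startswith_iff _ _).mp hsw))
    · rw [pvBOuter, dif_neg hi]

-- inner while when no closing quote remains: runs to the end of the string
theorem pvBInner_stop (s : List Char) : ∀ j lit, j ≤ s.length →
    (∀ p : Nat, j ≤ p → p < s.length → s.getD p ' ' ≠ '\'') →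
    (pvBInner s s.length j lit).1 = s.length := by
  intro j lit
  induction hk : s.length - j using Nat.strong_induction_on generalizing j lit with
  | _ k ih =>
    intro hj hq
    rw [pvBInner]
    split
    · next h =>
      exact ih (s.length - (j + 1)) (by omega) (j + 1) _ rfl (by omega)
        (fun p hp1 hp2 => hq p (by omega) hp2)
    · next h =>
      simp only [not_and, not_not] at h
      by_cases hjn : j < s.length
      · exact absurd (h hjn) (hq j (le_refl j) hjn)
      · simp only; omega

-- inner while up to the first quote at position e: collects exactly the characters between
theorem pvBInner_found (s : List Char) : ∀ j lit e, j ≤ e → e < s.length →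
    s.getD e ' ' = '\'' →
    (∀ p : Nat, j ≤ p → p < e → s.getD p ' ' ≠ '\'') →
    pvBInner s s.length j lit = (e, lit ++ (s.drop j).take (e - j)) := by
  intro j lit e hje
  induction hk : e - j using Nat.strong_induction_on generalizing j lit with
  | _ k ih =>
    intro he hqe hno
    subst hk
    by_cases hj : j < e
    · rw [pvBInner, dif_pos ⟨by omega, hno j (le_refl j) hj⟩]
      rw [ih (e - (j + 1)) (by omega) (j + 1) _ (by omega) rfl he hqe
          (fun p hp1 hp2 => hno p (by omega) hp2)]
      have hjlen : j < s.length := by omega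
      rw [List.drop_eq_getElem_cons hjlen]
      have hgd : s.getD j ' ' = s[j] := List.getD_eq_getElem s ' ' hjlen
      have htk : e - j = (e - (j + 1)) + 1 := by omega
      rw [htk, List.take_succ_cons, hgd]
      simp
    · have hje' : j = e := by omega
      subst hje'
      rw [pvBInner, dif_neg (fun hcon => hcon.2 hqe)]
      simp

-- main loop equivalence: A's find-jump loop equals B's character scan, from any position
theorem pvMain (s : List Char) : ∀ fuel idx out, s.length ≤ idx + fuel →
    pvALoop s idx out = pvBOuter s s.length idx out := by
  intro fuel
  induction fuel with
  | zero =>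
    intro idx out hlen
    have hnm : ¬ pvMarker <:+: s.drop idx := by
      rw [List.drop_eq_nil_of_le (by omega)]
      intro h
      have := h.length_le
      simp at this
      exact absurd this (by decide)
    have hff : PySem.Chars.findFrom s pvMarker (idx : Int) none = -1 := by
      by_cases hc : idx ≤ s.length
      · exact (PySem.Chars.findFrom_natCast_eq_neg_one_iff s pvMarker idx hc).mpr hnm
      · exact pvFindFrom_neg_of_len_lt s pvMarker idx (by omega)
    rw [pvALoop, dif_pos hff, pvBOuter, dif_neg (by omega)]
  | succ fuel ih =>
    intro idx out hlen
    by_cases hs : PySem.Chars.findFrom s pvMarker (idx : Int) none = -1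
    · -- no marker from idx on: both sides return out
      rw [pvALoop, dif_pos hs]
      have hnm : ¬ pvMarker <:+: s.drop idx := by
        by_cases hc : idx ≤ s.length
        · exact (PySem.Chars.findFrom_natCast_eq_neg_one_iff s pvMarker idx hc).mp hs
        · rw [List.drop_eq_nil_of_le (by omega)]
          intro h
          have := h.length_le
          simp at this
          exact absurd this (by decide)
      exact (pvBOuter_none s (fuel + 1) idx out hlen (pvNoPrefixFrom s pvMarker idx hnm)).symm
    · obtain ⟨h1, h2, h3, h4⟩ :=
        pvFindFrom_facts s pvMarker (idx : Int) (by positivity) (by decide) hs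
      set st := PySem.Chars.findFrom s pvMarker (idx : Int) none with hstdef
      have hst0 : 0 ≤ st := by omega
      have hmlen : pvMarker.length = 13 := by decide
      have hfit : st.toNat + 13 ≤ s.length := by omega
      -- B skips to the marker position st.toNat
      have hskip : pvBOuter s s.length idx out = pvBOuter s s.length st.toNat out := by
        have := pvBOuter_skip s (st.toNat - idx) idx out (by omega)
          (fun p hp1 hp2 => h4 p (by omega) (by omega))
        rw [this]; congr 1; omega
      have hcast13 : st + 13 = ((st.toNat + 13 : Nat) : Int) := by omega
      by_cases he : PySem.Chars.findFrom s ['\''] (st + 13) none = -1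
      · -- marker found but no closing quote: both sides return out
        rw [pvALoop, dif_neg hs, ← hstdef, dif_pos he, hskip]
        have hnq : ¬ ['\''] <:+: s.drop (st.toNat + 13) := by
          rw [hcast13] at he
          exact (PySem.Chars.findFrom_natCast_eq_neg_one_iff s ['\''] (st.toNat + 13)
            hfit).mp he
        have hnoq : ∀ p : Nat, st.toNat + 13 ≤ p → p < s.length → s.getD p ' ' ≠ '\'' := by
          intro p hp hpl hq
          exact pvNoPrefixFrom s ['\''] (st.toNat + 13) hnq p hp
            ((pvSingleton_prefix_iff s p '\'' (by decide)).mpr ⟨hpl, hq⟩)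
        rw [pvBOuter, dif_pos (by omega),
          if_pos (((PySem.Chars.startswith_iff _ _).mpr h3)),
          if_pos (le_of_eq (pvBInner_stop s (st.toNat + 13) [] hfit hnoq).symm)]
      · -- marker and closing quote found: both sides emit the literal and continue after it
        obtain ⟨g1, g2, g3, g4⟩ :=
          pvFindFrom_facts s ['\''] (st + 13) (by omega) (by decide) he
        set e := PySem.Chars.findFrom s ['\''] (st + 13) none with hedef
        simp only [List.length_cons, List.length_nil] at g2
        have he0 : 0 ≤ e := by omega
        have helen : e.toNat < s.length := by omega
        obtain ⟨heq1, heq2⟩ := (pvSingleton_prefix_iff s e.toNat '\'' (by decide)).mp g3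
        have hnoq : ∀ p : Nat, st.toNat + 13 ≤ p → p < e.toNat → s.getD p ' ' ≠ '\'' := by
          intro p hp hpl hq
          have : ((st + 13).toNat : Nat) ≤ p := by omega
          exact g4 p this hpl ((pvSingleton_prefix_iff s p '\'' (by decide)).mpr
            ⟨by omega, hq⟩)
        have hinner := pvBInner_found s (st.toNat + 13) [] e.toNat (by omega) helen heq2 hnoq
        rw [pvALoop, dif_neg hs, ← hstdef, dif_neg he, ← hedef, hskip]
        rw [pvBOuter, dif_pos (by omega), if_pos (((PySem.Chars.startswith_iff _ _).mpr h3))]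
        rw [hinner]
        simp only
        rw [if_neg (by omega)]
        have hslice : PySem.Chars.slice s (some (st + 13)) (some e)
            = (s.drop (st.toNat + 13)).take (e.toNat - (st.toNat + 13)) := by
          rw [PySem.Chars.slice_eq_listSlice, hcast13,
            (by omega : e = ((e.toNat : Nat) : Int)), PySem.List.slice_natCast]
          simp
          omega
        rw [hslice]
        simp only [List.nil_append]
        exact ih (e.toNat + 1) (out ++ [String.ofList ((s.drop (st.toNat + 13)).take
          (e.toNat - (st.toNat + 13)))]) (by omega)

-- ===== VERDICT (by name: the statement is the Claim_ definition above) =====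
theorem old_or_new_prefixes_py_spec : Claim_equal_old_or_new_prefixes_py := by
  intro query _
  unfold Spec_old_or_new_prefixes_py old_or_new_prefixes_py old_or_new_prefixes_py_alt
  exact pvMain query.toList query.toList.length 0 [] (by omega)
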